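-- pv_equiv track=rewrite | github.com/overandor/membramoney | 02_AI_Agents/agent_safe.py | order_patches
-- ===== SOURCE A (Python) =====
-- def order_patches(patches):
--     """
--     Order patches by dependency priority.
--     Lower priority numbers applied first.
--     """
--     priority = ["models", "services", "routes", "tests"]
--
--     def get_priority(patch):
--         file_path = patch.get("file", "")
--         for i, key in enumerate(priority):
--             if key in file_path:
--                 return i
--         return 999  # Lowest priority
--
--     return sorted(patches, key=get_priority)
-- ===== SOURCE B (Python) =====
-- def order_patches(patches):
--     """
--     Order patches by dependency priority.
--     Lower priority numbers applied first.
--     """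
--     keywords = ["models", "services", "routes", "tests"]
--     buckets = [[] for _ in range(len(keywords) + 1)]
--     for patch in patches:
--         file_path = patch.get("file", "")
--         for i, key in enumerate(keywords):
--             if key in file_path:
--                 buckets[i].append(patch)
--                 break
--         else:
--             buckets[-1].append(patch)
--     result = []
--     for bucket in buckets:
--         result.extend(bucket)
--     return result
-- ===== Notes on version B (the rewrite author's own statement) =====
-- stated objective: alternative
-- what changed: Replaces sorted(patches, key=...) with a single-pass 5-way bucket partition (one list per priority keyword plus a default bucket) concatenated in priority order, exploiting that only five priority classes exist.
import Mathlib
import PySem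

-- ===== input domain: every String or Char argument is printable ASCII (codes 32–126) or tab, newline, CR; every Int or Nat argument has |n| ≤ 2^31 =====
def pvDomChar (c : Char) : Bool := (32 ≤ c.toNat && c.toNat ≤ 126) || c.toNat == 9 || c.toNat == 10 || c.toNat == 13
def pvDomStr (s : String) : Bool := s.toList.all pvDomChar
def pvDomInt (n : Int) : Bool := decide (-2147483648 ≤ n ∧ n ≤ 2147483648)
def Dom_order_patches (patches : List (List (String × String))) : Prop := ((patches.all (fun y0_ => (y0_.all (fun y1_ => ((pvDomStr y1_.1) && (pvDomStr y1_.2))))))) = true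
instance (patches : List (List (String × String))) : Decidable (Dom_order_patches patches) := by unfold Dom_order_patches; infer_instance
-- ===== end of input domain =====

-- B replaces sorted(patches, key=priority) by a single-pass 5-way bucket partition
-- concatenated in priority order (alternative decomposition, same result).


-- ===== PORT A =====
def opPriority : List String := ["models", "services", "routes", "tests"]

-- the 'for i, key in enumerate(priority): if key in file_path: return i' loop; falls through to 999
def opGetPriorityLoop (filePath : String) : List (Int × String) → Int
  | [] => 999
  | (i, key) :: rest =>
      if PySem.Str.isIn key filePath then i else opGetPriorityLoop filePath rest

def opGetPriority (patch : List (String × String)) : Int :=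
  opGetPriorityLoop ((PySem.Dict.mk patch).getD "file" "") (PySem.List.enumerate opPriority)

def order_patches (patches : List (List (String × String))) : List (List (String × String)) :=
  PySem.List.sorted patches opGetPriority false

-- ===== PORT B =====
-- one step of B's single pass: append the patch to the bucket of its first matching keyword
def opAltStep
    (acc : List (List (String × String)) × List (List (String × String)) × List (List (String × String)) × List (List (String × String)) × List (List (String × String)))
    (patch : List (String × String)) :
    List (List (String × String)) × List (List (String × String)) × List (List (String × String)) × List (List (String × String)) × List (List (String × String)) :=
  let fp := (PySem.Dict.mk patch).getD "file" ""
  if PySem.Str.isIn "models" fp then (acc.1 ++ [patch], acc.2.1, acc.2.2.1, acc.2.2.2.1, acc.2.2.2.2)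
  else if PySem.Str.isIn "services" fp then (acc.1, acc.2.1 ++ [patch], acc.2.2.1, acc.2.2.2.1, acc.2.2.2.2)
  else if PySem.Str.isIn "routes" fp then (acc.1, acc.2.1, acc.2.2.1 ++ [patch], acc.2.2.2.1, acc.2.2.2.2)
  else if PySem.Str.isIn "tests" fp then (acc.1, acc.2.1, acc.2.2.1, acc.2.2.2.1 ++ [patch], acc.2.2.2.2)
  else (acc.1, acc.2.1, acc.2.2.1, acc.2.2.2.1, acc.2.2.2.2 ++ [patch])

def order_patches_alt (patches : List (List (String × String))) : List (List (String × String)) :=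
  let b := patches.foldl opAltStep ([], [], [], [], [])
  b.1 ++ b.2.1 ++ b.2.2.1 ++ b.2.2.2.1 ++ b.2.2.2.2

-- ===== PRECONDITION & SPEC =====
def Spec_order_patches (patches : List (List (String × String))) (out : List (List (String × String))) : Prop := out = order_patches_alt patches
instance (patches : List (List (String × String))) (out : List (List (String × String))) : Decidable (Spec_order_patches patches out) := by unfold Spec_order_patches; infer_instance

-- ===== CLAIM (what is proved, stated in full; the proofs are below) =====
def Claim_equal_order_patches : Prop := ∀ (patches : List (List (String × String))), Dom_order_patches patches → Spec_order_patches patches (order_patches patches)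

-- ===== LEMMAS AND PROOFS =====

-- bucket i of a list: the patches whose priority is i, in order
def opBucket (i : Int) (l : List (List (String × String))) : List (List (String × String)) :=
  l.filter (fun q => opGetPriority q == i)

theorem opGetPriority_unfold (p : List (String × String)) :
    opGetPriority p =
      (if PySem.Str.isIn "models" ((PySem.Dict.mk p).getD "file" "") then 0
       else if PySem.Str.isIn "services" ((PySem.Dict.mk p).getD "file" "") then 1
       else if PySem.Str.isIn "routes" ((PySem.Dict.mk p).getD "file" "") then 2
       else if PySem.Str.isIn "tests" ((PySem.Dict.mk p).getD "file" "") then 3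
       else 999) := rfl

theorem opGetPriority_cases (p : List (String × String)) :
    opGetPriority p = 0 ∨ opGetPriority p = 1 ∨ opGetPriority p = 2 ∨
    opGetPriority p = 3 ∨ opGetPriority p = 999 := by
  rw [opGetPriority_unfold]; split_ifs <;> simp

theorem mem_opBucket {i : Int} {l : List (List (String × String))}
    {q : List (String × String)} (h : q ∈ opBucket i l) : opGetPriority q = i := by
  have := List.mem_filter.mp h
  simpa using this.2

theorem opBucket_append (i : Int) (l : List (List (String × String)))
    (x : List (String × String)) :
    opBucket i (l ++ [x]) = opBucket i l ++ (if opGetPriority x = i then [x] else []) := by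
  by_cases h : opGetPriority x = i
  · simp [opBucket, List.filter_append, List.filter, h]
  · have hb : (opGetPriority x == i) = false := beq_eq_false_iff_ne.mpr h
    simp [opBucket, List.filter_append, List.filter, hb, h]

theorem insertBy_between {α : Type} (before : α → α → Bool) (x : α) (ys zs : List α)
    (h1 : ∀ y ∈ ys, before x y = false) (h2 : ∀ z ∈ zs, before x z = true) :
    PySem.List.insertBy before x (ys ++ zs) = ys ++ x :: zs := by
  induction ys with
  | nil =>
      cases zs with
      | nil => simp [PySem.List.insertBy]
      | cons z t => simp [PySem.List.insertBy, h2 z (by simp)]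
  | cons y t ih =>
      have hy := h1 y (by simp)
      simp [PySem.List.insertBy, hy, ih (fun y' hy' => h1 y' (by simp [hy']))]

-- B's fold computes the five buckets
theorem foldB (l : List (List (String × String)))
    (a0 a1 a2 a3 a4 : List (List (String × String))) :
    l.foldl opAltStep (a0, a1, a2, a3, a4) =
      (a0 ++ opBucket 0 l, a1 ++ opBucket 1 l, a2 ++ opBucket 2 l,
       a3 ++ opBucket 3 l, a4 ++ opBucket 999 l) := by
  induction l generalizing a0 a1 a2 a3 a4 with
  | nil => simp [opBucket]
  | cons q t ih =>
      have hq := opGetPriority_unfold q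
      simp only [List.foldl_cons, opAltStep]
      split_ifs with h1 h2 h3 h4 <;>
        · rw [ih]
          simp_all [opBucket]
  
-- A's insertion sort computes the same concatenation of buckets
theorem foldA (l : List (List (String × String))) :
    PySem.List.sorted l opGetPriority false =
      opBucket 0 l ++ opBucket 1 l ++ opBucket 2 l ++ opBucket 3 l ++ opBucket 999 l := by
  induction l using List.reverseRecOn with
  | nil => simp [PySem.List.sorted, opBucket]
  | append_singleton t x ih =>
      rw [PySem.List.sorted_eq_foldl_insertBy] at ih ⊢
      rw [List.foldl_append, List.foldl_cons, List.foldl_nil, ih]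
      rcases opGetPriority_cases x with hx | hx | hx | hx | hx
      · rw [show opBucket 0 t ++ opBucket 1 t ++ opBucket 2 t ++ opBucket 3 t ++ opBucket 999 t
            = opBucket 0 t ++ (opBucket 1 t ++ opBucket 2 t ++ opBucket 3 t ++ opBucket 999 t) by
              simp [List.append_assoc]]
        rw [insertBy_between _ x _ _
          (fun y hy => by simp [hx, mem_opBucket hy])
          (fun z hz => by
            simp only [List.append_assoc, List.mem_append] at hz
            rcases hz with h | h | h | h <;> simp [hx, mem_opBucket h])]
        simp [opBucket_append, hx, List.append_assoc]
      · rw [show opBucket 0 t ++ opBucket 1 t ++ opBucket 2 t ++ opBucket 3 t ++ opBucket 999 t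
            = (opBucket 0 t ++ opBucket 1 t) ++ (opBucket 2 t ++ opBucket 3 t ++ opBucket 999 t) by
              simp [List.append_assoc]]
        rw [insertBy_between _ x _ _
          (fun y hy => by
            simp only [List.mem_append] at hy
            rcases hy with h | h <;> simp [hx, mem_opBucket h])
          (fun z hz => by
            simp only [List.append_assoc, List.mem_append] at hz
            rcases hz with h | h | h <;> simp [hx, mem_opBucket h])]
        simp [opBucket_append, hx, List.append_assoc]
      · rw [show opBucket 0 t ++ opBucket 1 t ++ opBucket 2 t ++ opBucket 3 t ++ opBucket 999 t
            = (opBucket 0 t ++ opBucket 1 t ++ opBucket 2 t) ++ (opBucket 3 t ++ opBucket 999 t) by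
              simp [List.append_assoc]]
        rw [insertBy_between _ x _ _
          (fun y hy => by
            simp only [List.mem_append] at hy
            rcases hy with (h | h) | h <;> simp [hx, mem_opBucket h])
          (fun z hz => by
            simp only [List.mem_append] at hz
            rcases hz with h | h <;> simp [hx, mem_opBucket h])]
        simp [opBucket_append, hx, List.append_assoc]
      · rw [show opBucket 0 t ++ opBucket 1 t ++ opBucket 2 t ++ opBucket 3 t ++ opBucket 999 t
            = (opBucket 0 t ++ opBucket 1 t ++ opBucket 2 t ++ opBucket 3 t) ++ opBucket 999 t by
              simp [List.append_assoc]]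
        rw [insertBy_between _ x _ _
          (fun y hy => by
            simp only [List.mem_append] at hy
            rcases hy with ((h | h) | h) | h <;> simp [hx, mem_opBucket h])
          (fun z hz => by simp [hx, mem_opBucket hz])]
        simp [opBucket_append, hx, List.append_assoc]
      · rw [PySem.List.insertBy_of_forall_not_before _ x _
          (fun y hy => by
            simp only [List.mem_append] at hy
            rcases hy with (((h | h) | h) | h) | h <;> simp [hx, mem_opBucket h])]
        simp [opBucket_append, hx, List.append_assoc]

-- ===== VERDICT (by name: the statement is the Claim_ definition above) =====
theorem order_patches_spec : Claim_equal_order_patches := by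
  intro patches _
  show order_patches patches = order_patches_alt patches
  rw [order_patches, order_patches_alt, foldA, foldB]
  simp [List.append_assoc]
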